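-- pv_equiv track=rewrite | github.com/samitmohan/Interviews-with-Python | Problems/DP/getWordsInLongestSubsequence.py | getWordsinLongestSubsequenceDAG
-- ===== SOURCE A (Python) =====
-- from functools import cache
--
-- def getWordsinLongestSubsequenceDAG(words, groups):
--     n = len(words)
--
--     def valid(i, j):
--         return (
--             groups[i] != groups[j]
--             and len(words[i]) == len(words[j])
--             and sum(a != b for a, b in zip(words[i], words[j])) == 1
--         )
--
--     # build graph
--     graph = [[] for _ in range(n)]
--     for i in range(n):
--         for j in range(i + 1, n):
--             if valid(i, j):
--                 graph[i].append(j)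
--
--     @cache
--     def dfs(u):
--         best = [words[u]]  # init
--         for vrtx in graph[u]:
--             path = dfs(vrtx)
--             if 1 + len(path) > len(best):
--                 best = [words[u]] + path
--         return best
--
--     # run dfs from all nodes
--     ans = []
--     for i in range(n):
--         path = dfs(i)
--         if len(path) > len(ans):
--             ans = path
--     return ans
-- ===== SOURCE B (Python) =====
-- # B: bottom-up DP with wildcard-pattern buckets for single-char-diff neighbours,
-- # scalar best-length + successor-pointer arrays, then one path reconstruction.
-- def getWordsinLongestSubsequenceDAG(words, groups):
--     n = len(words)
--     buckets = {}
--     for i in range(n):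
--         w = words[i]
--         for k in range(len(w)):
--             key = (k, w[:k], w[k + 1:])
--             buckets[key] = buckets.get(key, []) + [i]
--     best_len = [1] * n
--     nxt = [-1] * n
--     for u in range(n - 1, -1, -1):
--         w = words[u]
--         for k in range(len(w)):
--             for j in buckets[(k, w[:k], w[k + 1:])]:
--                 if j > u and groups[j] != groups[u] and words[j][k] != w[k]:
--                     cand = 1 + best_len[j]
--                     if cand > best_len[u] or (cand == best_len[u] and j < nxt[u]):
--                         best_len[u] = cand
--                         nxt[u] = j
--     start = -1
--     for i in range(n):
--         if start == -1 or best_len[i] > best_len[start]: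
--             start = i
--     out = []
--     u = start
--     while u != -1:
--         out.append(words[u])
--         u = nxt[u]
--     return out
-- ===== Notes on version B (the rewrite author's own statement) =====
-- stated objective: faster
-- what changed: Replaces A's O(n^2*L) all-pairs edge scan plus memoized DFS that builds full path lists with wildcard-pattern hash buckets that yield single-char-diff neighbours directly, a backward scalar DP over indices keeping only best-length and successor-pointer arrays, and a single final path reconstruction.
import Mathlib
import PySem

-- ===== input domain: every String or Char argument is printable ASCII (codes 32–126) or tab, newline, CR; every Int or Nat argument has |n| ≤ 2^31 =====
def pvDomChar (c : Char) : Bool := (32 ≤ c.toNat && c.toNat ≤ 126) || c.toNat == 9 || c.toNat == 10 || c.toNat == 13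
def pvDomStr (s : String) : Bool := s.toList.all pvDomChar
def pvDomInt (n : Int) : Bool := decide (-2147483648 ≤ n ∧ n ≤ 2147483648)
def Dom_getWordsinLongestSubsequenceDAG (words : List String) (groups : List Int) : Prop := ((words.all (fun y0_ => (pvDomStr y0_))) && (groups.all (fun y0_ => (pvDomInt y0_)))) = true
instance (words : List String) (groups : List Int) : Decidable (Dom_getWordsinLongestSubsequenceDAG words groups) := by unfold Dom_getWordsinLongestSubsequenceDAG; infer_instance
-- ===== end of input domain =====

-- B replaces A's O(n^2·L) all-pairs edge scan + memoized path-list DFS by wildcard-pattern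
-- buckets for single-char-diff neighbours and a backward scalar DP (best length + successor
-- pointer) with one final path reconstruction; return values agree on all inputs where A returns.

-- ===== PORT A =====
-- sum(a != b for a, b in zip(words[i], words[j]))
def pvDiffs (a b : List Char) : Nat := (a.zip b).countP (fun p => decide (p.1 ≠ p.2))

def pvValid (words : List String) (groups : List Int) (i j : Nat) : Bool :=
  decide (groups.getD i 0 ≠ groups.getD j 0) &&
  ((words.getD i "").toList.length == (words.getD j "").toList.length) &&
  (pvDiffs (words.getD i "").toList (words.getD j "").toList == 1)

-- graph[i] = [j for j in range(i+1, n) if valid(i, j)]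
def pvNbrs (words : List String) (groups : List Int) (n i : Nat) : List Nat :=
  (List.range' (i+1) (n - (i+1))).filter (fun j => pvValid words groups i j)

-- the cached dfs; fuel only for termination (neighbours are strictly larger, fuel n suffices)
def pvDfsA (words : List String) (groups : List Int) (n : Nat) : Nat → Nat → List String
  | 0, u => [words.getD u ""]
  | f+1, u =>
    (pvNbrs words groups n u).foldl
      (fun best j =>
        let path := pvDfsA words groups n f j
        if best.length < 1 + path.length then words.getD u "" :: path else best)
      [words.getD u ""]

def getWordsinLongestSubsequenceDAG (words : List String) (groups : List Int) : List String :=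
  let n := words.length
  (List.range n).foldl
    (fun ans i =>
      let path := pvDfsA words groups n n i
      if ans.length < path.length then path else ans)
    []

-- ===== PORT B =====
-- key (k, w[:k], w[k+1:]); the Python slices with 0 ≤ k < len w are exactly take/drop
def pvKeyB (w : List Char) (k : Nat) : Nat × List Char × List Char := (k, w.take k, w.drop (k+1))

def pvBuckets (words : List String) (n : Nat) :
    PySem.Dict (Nat × List Char × List Char) (List Nat) :=
  (List.range n).foldl
    (fun d i =>
      let w := (words.getD i "").toList
      (List.range w.length).foldl
        (fun d k => d.insert (pvKeyB w k) (d.getD (pvKeyB w k) [] ++ [i])) d)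
    PySem.Dict.empty

-- the two inner loops of B's main loop at index u (running cell (best_len[u], nxt[u]) as state)
def pvInnerB (words : List String) (groups : List Int)
    (d : PySem.Dict (Nat × List Char × List Char) (List Nat))
    (bestLen nxt : List Int) (u : Nat) : Int × Int :=
  let w := (words.getD u "").toList
  (List.range w.length).foldl
    (fun p k =>
      (d.getD (pvKeyB w k) []).foldl
        (fun p j =>
          if decide (u < j) && decide (groups.getD j 0 ≠ groups.getD u 0) &&
             decide ((words.getD j "").toList.getD k ' ' ≠ w.getD k ' ')
          then
            let cand := 1 + bestLen.getD j 0
            if decide (cand > p.1) || ((cand == p.1) && decide ((j : Int) < p.2)) then (cand, (j : Int)) else p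
          else p)
        p)
    (bestLen.getD u 0, nxt.getD u 0)

-- for u in range(n-1, -1, -1)
def pvLoopB (words : List String) (groups : List Int) (n : Nat)
    (d : PySem.Dict (Nat × List Char × List Char) (List Nat)) : List Int × List Int :=
  (List.range n).reverse.foldl
    (fun st u =>
      let p := pvInnerB words groups d st.1 st.2 u
      (st.1.set u p.1, st.2.set u p.2))
    (List.replicate n 1, List.replicate n (-1))

def pvStartB (bestLen : List Int) (n : Nat) : Int :=
  (List.range n).foldl
    (fun s i =>
      if s == (-1 : Int) || decide (bestLen.getD i 0 > bestLen.getD s.toNat 0) then (i : Int) else s)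
    (-1)

-- while u != -1: out.append(words[u]); u = nxt[u]   (fuel n suffices: nxt is strictly increasing)
def pvFollowB (words : List String) (nxt : List Int) : Nat → Int → List String
  | 0, _ => []
  | f+1, u => if u == (-1 : Int) then [] else words.getD u.toNat "" :: pvFollowB words nxt f (nxt.getD u.toNat 0)

def getWordsinLongestSubsequenceDAG_alt (words : List String) (groups : List Int) : List String :=
  let n := words.length
  let d := pvBuckets words n
  let st := pvLoopB words groups n d
  pvFollowB words st.2 n (pvStartB st.1 n)

-- ===== PRECONDITION & SPEC =====
-- Pre_ excludes exactly the inputs on which Python A raises IndexError: with at least two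
-- words, valid(i, n-1) reads groups[n-1], so A raises whenever groups is shorter than words.
def Pre_getWordsinLongestSubsequenceDAG (words : List String) (groups : List Int) : Prop :=
  words.length ≤ groups.length ∨ words.length ≤ 1
instance (words : List String) (groups : List Int) : Decidable (Pre_getWordsinLongestSubsequenceDAG words groups) := by unfold Pre_getWordsinLongestSubsequenceDAG; infer_instance

def pvWitness_getWordsinLongestSubsequenceDAG : List String × List Int := (["ab", "ac"], [0, 1])

def Spec_getWordsinLongestSubsequenceDAG (words : List String) (groups : List Int) (out : List String) : Prop := out = getWordsinLongestSubsequenceDAG_alt words groups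
instance (words : List String) (groups : List Int) (out : List String) : Decidable (Spec_getWordsinLongestSubsequenceDAG words groups out) := by unfold Spec_getWordsinLongestSubsequenceDAG; infer_instance

-- ===== CLAIM (what is proved, stated in full; the proofs are below) =====
def Claim_equal_getWordsinLongestSubsequenceDAG : Prop := ∀ (words : List String) (groups : List Int), Dom_getWordsinLongestSubsequenceDAG words groups → Pre_getWordsinLongestSubsequenceDAG words groups → Spec_getWordsinLongestSubsequenceDAG words groups (getWordsinLongestSubsequenceDAG words groups)

-- ===== LEMMAS AND PROOFS =====

-- canonical dfs value (full fuel) and its length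
def pvS (words : List String) (groups : List Int) (n u : Nat) : List String :=
  pvDfsA words groups n n u
def pvLS (words : List String) (groups : List Int) (n u : Nat) : Nat :=
  (pvS words groups n u).length

-- first-maximum machinery over a score function
def pvMx (sc : Nat → Nat) : List Nat → Nat
  | [] => 0
  | j :: t => max (sc j) (pvMx sc t)
def pvFam (sc : Nat → Nat) : List Nat → Nat
  | [] => 0
  | j :: t => if pvMx sc t ≤ sc j then j else pvFam sc t

-- the score used by both sides for neighbours of u
def pvSc (words : List String) (groups : List Int) (n : Nat) (j : Nat) : Nat :=
  1 + pvLS words groups n j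

-- the successor pointer B computes (spec form)
def pvNx (words : List String) (groups : List Int) (n u : Nat) : Int :=
  if pvNbrs words groups n u = [] then -1
  else ((pvFam (pvSc words groups n) (pvNbrs words groups n u) : Nat) : Int)


theorem pvMem_nbrs (words : List String) (groups : List Int) (n u j : Nat) :
    j ∈ pvNbrs words groups n u ↔ (u < j ∧ j < n) ∧ pvValid words groups u j = true := by
  unfold pvNbrs
  rw [List.mem_filter, List.mem_range'_1]
  constructor
  · rintro ⟨h1, h2⟩; exact ⟨⟨by omega, by omega⟩, h2⟩
  · rintro ⟨⟨h1, h2⟩, h3⟩; exact ⟨⟨by omega, by omega⟩, h3⟩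

theorem pvNbrs_pairwise (words : List String) (groups : List Int) (n u : Nat) :
    (pvNbrs words groups n u).Pairwise (· < ·) := by
  exact (List.pairwise_lt_range' ..).filter _

theorem pvFoldFM {α : Type} (v : Nat → α) (m : α → Nat) (sc : Nat → Nat) :
    ∀ (l : List Nat), (∀ j ∈ l, m (v j) = sc j) → ∀ (b : α),
    l.foldl (fun b j => if m b < sc j then v j else b) b
      = if m b < pvMx sc l then v (pvFam sc l) else b := by
  intro l
  induction l with
  | nil => intro _ b; simp [pvMx]
  | cons j t ih =>
    intro hm b
    have hmj := hm j (List.mem_cons_self ..)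
    have ih' := ih (fun x hx => hm x (List.mem_cons_of_mem _ hx))
    simp only [List.foldl_cons, pvMx, pvFam]
    by_cases hb : m b < sc j
    · rw [if_pos hb, ih' (v j), hmj]
      split_ifs <;> first | rfl | omega
    · rw [if_neg hb, ih' b]
      split_ifs <;> first | rfl | omega

theorem pvMx_ge (sc : Nat → Nat) (l : List Nat) (j : Nat) (h : j ∈ l) : sc j ≤ pvMx sc l := by
  induction l with
  | nil => simp at h
  | cons a t ih =>
    rcases List.mem_cons.mp h with rfl | h'
    · simp [pvMx]
    · have := ih h'; simp only [pvMx]; omega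

theorem pvFam_mem (sc : Nat → Nat) (l : List Nat) (h : l ≠ []) :
    pvFam sc l ∈ l ∧ sc (pvFam sc l) = pvMx sc l := by
  induction l with
  | nil => simp at h
  | cons a t ih =>
    simp only [pvFam, pvMx]
    by_cases hc : pvMx sc t ≤ sc a
    · rw [if_pos hc]; exact ⟨List.mem_cons_self .., by omega⟩
    · rw [if_neg hc]
      have ht : t ≠ [] := by rintro rfl; simp [pvMx] at hc
      obtain ⟨h1, h2⟩ := ih ht
      exact ⟨List.mem_cons_of_mem _ h1, by omega⟩

theorem pvFam_min (sc : Nat → Nat) (l : List Nat) (hp : l.Pairwise (· < ·)) :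
    ∀ j ∈ l, sc j = pvMx sc l → pvFam sc l ≤ j := by
  induction l with
  | nil => intro j hj; simp at hj
  | cons a t ih =>
    intro j hj hsc
    simp only [pvFam, pvMx] at *
    rcases List.mem_cons.mp hj with rfl | hj'
    · split_ifs with hc
      · exact le_refl _
      · omega
    · have hlt := (List.pairwise_cons.mp hp).1 j hj'
      have hmx := pvMx_ge sc t j hj'
      split_ifs with hc
      · omega
      · exact ih (List.pairwise_cons.mp hp).2 j hj' (by omega)

theorem pvDfs_succ (words : List String) (groups : List Int) (n : Nat) :
    ∀ (f u : Nat), n - u ≤ f → pvDfsA words groups n f u = pvDfsA words groups n (f+1) u := by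
  intro f
  induction f with
  | zero =>
    intro u hu
    have hnb : pvNbrs words groups n u = [] := by
      unfold pvNbrs
      have h0 : n - (u+1) = 0 := by omega
      rw [h0]; rfl
    simp [pvDfsA, hnb]
  | succ f ih =>
    intro u hu
    show pvDfsA words groups n (f+1) u = pvDfsA words groups n (f+1+1) u
    conv_lhs => rw [pvDfsA]
    conv_rhs => rw [pvDfsA]
    apply PySem.List.foldl_congr_mem
    intro acc j hj
    have hj' := (pvMem_nbrs words groups n u j).mp hj
    have hf : pvDfsA words groups n f j = pvDfsA words groups n (f+1) j := ih j (by omega)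
    simp only [hf]

theorem pvDfs_add (words : List String) (groups : List Int) (n : Nat) :
    ∀ (g f u : Nat), n - u ≤ f → pvDfsA words groups n f u = pvDfsA words groups n (f+g) u := by
  intro g
  induction g with
  | zero => intro f u _; rfl
  | succ g ih =>
    intro f u hu
    rw [show f + (g+1) = (f+g)+1 by omega]
    rw [ih f u hu, pvDfs_succ words groups n (f+g) u (by omega)]

theorem pvDfs_fuel (words : List String) (groups : List Int) (n : Nat) :
    ∀ (f u : Nat), n - u ≤ f → pvDfsA words groups n f u = pvS words groups n u := by
  intro f u hu
  unfold pvS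
  rcases le_total f n with h | h
  · have := pvDfs_add words groups n (n - f) f u hu
    have e : f + (n - f) = n := by omega
    rw [e] at this; exact this
  · have := pvDfs_add words groups n (f - n) n u (by omega)
    have e : n + (f - n) = f := by omega
    rw [e] at this; exact this.symm

theorem pvS_eq (words : List String) (groups : List Int) (n u : Nat) :
    pvS words groups n u
      = (pvNbrs words groups n u).foldl
          (fun best j =>
            if best.length < pvSc words groups n j
            then words.getD u "" :: pvS words groups n j else best)
          [words.getD u ""] := by
  cases n with
  | zero =>
    have hnb : pvNbrs words groups 0 u = [] := by
      unfold pvNbrs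
      have h0 : 0 - (u+1) = 0 := by omega
      rw [h0]; rfl
    rw [hnb]
    simp [pvS, pvDfsA]
  | succ f =>
    show pvDfsA words groups (f+1) (f+1) u = _
    conv_lhs => rw [pvDfsA]
    apply PySem.List.foldl_congr_mem
    intro acc j hj
    have hj' := (pvMem_nbrs words groups (f+1) u j).mp hj
    rw [pvDfs_fuel words groups (f+1) f j (by omega)]
    simp [pvSc, pvLS]

theorem pvDfs_len_pos (words : List String) (groups : List Int) (n : Nat) :
    ∀ (f u : Nat), 1 ≤ (pvDfsA words groups n f u).length := by
  intro f
  induction f with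
  | zero => intro u; simp [pvDfsA]
  | succ f ih =>
    intro u
    rw [pvDfsA]
    suffices h : ∀ (l : List Nat) (b : List String), 1 ≤ b.length →
        1 ≤ (l.foldl (fun best j =>
          let path := pvDfsA words groups n f j
          if best.length < 1 + path.length then words.getD u "" :: path else best) b).length by
      exact h _ _ (by simp)
    intro l
    induction l with
    | nil => intro b hb; simpa
    | cons j t ih2 =>
      intro b hb
      simp only [List.foldl_cons]
      apply ih2
      dsimp only
      split_ifs with h
      · simp
      · exact hb

theorem pvLS_pos (words : List String) (groups : List Int) (n u : Nat) :
    1 ≤ pvLS words groups n u := by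
  unfold pvLS pvS
  exact pvDfs_len_pos words groups n n u

theorem pvS_char_nil (words : List String) (groups : List Int) (n u : Nat)
    (h : pvNbrs words groups n u = []) : pvS words groups n u = [words.getD u ""] := by
  rw [pvS_eq, h]
  rfl

theorem pvS_char_cons (words : List String) (groups : List Int) (n u : Nat)
    (h : pvNbrs words groups n u ≠ []) :
    pvS words groups n u
      = words.getD u "" :: pvS words groups n (pvFam (pvSc words groups n) (pvNbrs words groups n u)) := by
  rw [pvS_eq, pvFoldFM (fun j => words.getD u "" :: pvS words groups n j) List.length
        (pvSc words groups n) _ (fun j _ => by simp [pvSc, pvLS]; omega) _]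
  rw [if_pos ?hc]
  case hc =>
    obtain ⟨j, hj⟩ := List.exists_mem_of_ne_nil _ h
    have h1 := pvMx_ge (pvSc words groups n) _ j hj
    have h2 := pvLS_pos words groups n j
    simp only [List.length_singleton]
    simp only [pvSc] at h1 ⊢
    omega

-- ---- diff-count combinatorics ----

theorem pvDiffs_self (a : List Char) : pvDiffs a a = 0 := by
  induction a with
  | nil => rfl
  | cons x a ih => simp [pvDiffs] at *; exact ih

theorem pvDiffs_zero (a b : List Char) (hl : a.length = b.length) :
    pvDiffs a b = 0 ↔ a = b := by
  induction a generalizing b with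
  | nil => cases b <;> simp_all [pvDiffs]
  | cons x a ih =>
    cases b with
    | nil => simp at hl
    | cons y b =>
      have hl' : a.length = b.length := by simpa using hl
      simp only [pvDiffs, List.zip_cons_cons, List.countP_cons] at *
      rw [← pvDiffs] at *
      constructor
      · intro h
        have h1 : pvDiffs a b = 0 := by omega
        have h2 : ¬ (x ≠ y) := by by_contra hc; simp [hc] at h
        have := (ih b hl').mp h1
        simp_all
      · rintro h
        injection h with h1 h2
        subst h1; subst h2
        simp [pvDiffs_self]

theorem pvOneDiff (a b : List Char) :
    (∃ k, k < a.length ∧ (k < b.length ∧ b.take k = a.take k ∧ b.drop (k+1) = a.drop (k+1)) ∧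
      b.getD k ' ' ≠ a.getD k ' ')
    ↔ (a.length = b.length ∧ pvDiffs a b = 1) := by
  induction a generalizing b with
  | nil =>
    constructor
    · rintro ⟨k, hk, _⟩; simp at hk
    · rintro ⟨hl, hd⟩; simp [pvDiffs] at hd
  | cons x a ih =>
    cases b with
    | nil =>
      constructor
      · rintro ⟨k, hk, ⟨hkb, _, _⟩, _⟩; simp at hkb
      · rintro ⟨hl, _⟩; simp at hl
    | cons y b =>
      constructor
      · rintro ⟨k, hk, ⟨hkb, htk, hdk⟩, hne⟩
        cases k with
        | zero =>
          simp only [List.drop_succ_cons, List.drop_zero] at hdk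
          simp only [List.getD_cons_zero] at hne
          subst hdk
          refine ⟨by simp, ?_⟩
          simp only [pvDiffs, List.zip_cons_cons, List.countP_cons, decide_eq_true_eq]
          rw [← pvDiffs, pvDiffs_self]
          simp [Ne.symm hne]
        | succ m =>
          simp only [List.take_succ_cons, List.cons.injEq] at htk
          obtain ⟨hyx, htk'⟩ := htk
          simp only [List.drop_succ_cons] at hdk
          simp only [List.getD_cons_succ] at hne
          have hm : m < a.length := by simpa using hk
          have hmb : m < b.length := by simpa using hkb
          obtain ⟨hl', hd'⟩ := (ih b).mp ⟨m, hm, ⟨hmb, htk', hdk⟩, hne⟩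
          refine ⟨by simp [hl'], ?_⟩
          simp only [pvDiffs, List.zip_cons_cons, List.countP_cons, decide_eq_true_eq]
          rw [← pvDiffs]
          simp [hd', hyx]
      · rintro ⟨hl, hd⟩
        have hl' : a.length = b.length := by simpa using hl
        simp only [pvDiffs, List.zip_cons_cons, List.countP_cons, decide_eq_true_eq] at hd
        rw [← pvDiffs] at hd
        by_cases hxy : x = y
        · subst hxy
          simp at hd
          obtain ⟨m, hm, ⟨hmb, htk, hdk⟩, hne⟩ := (ih b).mpr ⟨hl', hd⟩
          refine ⟨m+1, by simpa using hm, ⟨by simpa using hmb, ?_, ?_⟩, ?_⟩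
          · simp [List.take_succ_cons, htk]
          · simpa [List.drop_succ_cons] using hdk
          · simpa [List.getD_cons_succ] using hne
        · have hd0 : pvDiffs a b = 0 := by
            simp [hxy] at hd; omega
          have hab : a = b := (pvDiffs_zero a b hl').mp hd0
          refine ⟨0, by simp, ⟨by simp, by simp, ?_⟩, ?_⟩
          · simp [List.drop_succ_cons, hab]
          · simpa using Ne.symm hxy

-- ---- bucket characterization ----

def pvMatch (words : List String) (key : Nat × List Char × List Char) (j : Nat) : Prop :=
  key.1 < (words.getD j "").toList.length ∧
  (words.getD j "").toList.take key.1 = key.2.1 ∧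
  (words.getD j "").toList.drop (key.1+1) = key.2.2

theorem pvBucketsInner (i : Nat) (w : List Char)
    (D : PySem.Dict (Nat × List Char × List Char) (List Nat))
    (Q : (Nat × List Char × List Char) → Nat → Prop)
    (hD : ∀ key j, j ∈ D.getD key [] ↔ Q key j) :
    ∀ (t : Nat) (key : Nat × List Char × List Char) (j : Nat),
    j ∈ ((List.range t).foldl
          (fun d k => d.insert (pvKeyB w k) (d.getD (pvKeyB w k) [] ++ [i])) D).getD key []
      ↔ Q key j ∨ (j = i ∧ key.1 < t ∧ key = pvKeyB w key.1) := by
  intro t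
  induction t with
  | zero =>
    intro key j
    simp only [List.range_zero, List.foldl_nil, hD]
    constructor
    · exact Or.inl
    · rintro (h | ⟨_, h, _⟩)
      · exact h
      · omega
  | succ t ih =>
    intro key j
    rw [List.range_succ, List.foldl_append, List.foldl_cons, List.foldl_nil]
    rw [PySem.Dict.getD_insert]
    by_cases hk : key = pvKeyB w t
    · rw [if_pos hk]
      rw [List.mem_append, List.mem_singleton, ih]
      subst hk
      constructor
      · rintro ((h | ⟨_, hlt, _⟩) | rfl)
        · exact Or.inl h
        · simp [pvKeyB] at hlt
        · exact Or.inr ⟨rfl, by simp [pvKeyB], by simp [pvKeyB]⟩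
      · rintro (h | ⟨rfl, _, _⟩)
        · exact Or.inl (Or.inl h)
        · exact Or.inr rfl
    · rw [if_neg hk, ih]
      constructor
      · rintro (h | ⟨rfl, h1, h2⟩)
        · exact Or.inl h
        · exact Or.inr ⟨rfl, by omega, h2⟩
      · rintro (h | ⟨rfl, h1, h2⟩)
        · exact Or.inl h
        · refine Or.inr ⟨rfl, ?_, h2⟩
          rcases Nat.lt_succ_iff_lt_or_eq.mp h1 with h | h
          · exact h
          · exfalso; apply hk; rw [h2]; rw [h]
  
theorem pvBuckets_mem (words : List String) (n : Nat)
    (key : Nat × List Char × List Char) (j : Nat) :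
    j ∈ (pvBuckets words n).getD key [] ↔ j < n ∧ pvMatch words key j := by
  unfold pvBuckets
  induction n generalizing key j with
  | zero =>
    simp only [List.range_zero, List.foldl_nil, PySem.Dict.getD_empty]
    simp
  | succ m ih =>
    rw [List.range_succ, List.foldl_append, List.foldl_cons, List.foldl_nil]
    rw [pvBucketsInner m ((words.getD m "").toList) _ (fun key j => j < m ∧ pvMatch words key j)
          (fun key j => ih key j) _ key j]
    unfold pvMatch pvKeyB
    constructor
    · rintro (⟨h1, h2⟩ | ⟨rfl, h1, h2⟩)
      · exact ⟨by omega, h2⟩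
      · rw [h2]
        exact ⟨by omega, h1, rfl, rfl⟩
    · rintro ⟨h1, h2, h3, h4⟩
      rcases Nat.lt_succ_iff_lt_or_eq.mp h1 with h | rfl
      · exact Or.inl ⟨h, h2, h3, h4⟩
      · refine Or.inr ⟨rfl, h2, ?_⟩
        rw [h3, h4]

-- ---- B's inner double loop = first-max over the neighbour set ----

def pvLe (p q : Int × Int) : Prop := p.1 < q.1 ∨ (p.1 = q.1 ∧ q.2 ≤ p.2)

theorem pvLe_refl (p : Int × Int) : pvLe p p := Or.inr ⟨rfl, le_refl _⟩

theorem pvLe_trans (p q r : Int × Int) (h1 : pvLe p q) (h2 : pvLe q r) : pvLe p r := by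
  unfold pvLe at *; omega

theorem pvLe_antisymm (p q : Int × Int) (h1 : pvLe p q) (h2 : pvLe q p) : p = q := by
  unfold pvLe at *
  have : p.1 = q.1 ∧ p.2 = q.2 := by omega
  exact Prod.ext this.1 this.2

theorem pvFoldMax (g : Nat → Int) :
    ∀ (l : List Nat) (p : Int × Int),
    (let r := l.foldl
        (fun p j => if decide (g j > p.1) || ((g j == p.1) && decide ((j : Int) < p.2))
                    then (g j, (j : Int)) else p) p
     (r = p ∨ ∃ j ∈ l, r = (g j, (j : Int))) ∧ pvLe p r ∧ ∀ j ∈ l, pvLe (g j, (j : Int)) r) := by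
  intro l
  induction l with
  | nil => intro p; exact ⟨Or.inl rfl, pvLe_refl p, by simp⟩
  | cons j t ih =>
    intro p
    simp only [List.foldl_cons]
    by_cases hcb : (decide (g j > p.1) || ((g j == p.1) && decide ((j : Int) < p.2))) = true
    · rw [if_pos hcb]
      obtain ⟨h1, h2, h3⟩ := ih (g j, (j : Int))
      simp only [Bool.or_eq_true, Bool.and_eq_true, decide_eq_true_eq, beq_iff_eq] at hcb
      refine ⟨?_, ?_, ?_⟩
      · rcases h1 with h | ⟨x, hx, hr⟩
        · exact Or.inr ⟨j, List.mem_cons_self .., h⟩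
        · exact Or.inr ⟨x, List.mem_cons_of_mem _ hx, hr⟩
      · refine pvLe_trans _ (g j, (j : Int)) _ ?_ h2
        unfold pvLe; omega
      · intro x hx
        rcases List.mem_cons.mp hx with rfl | hx'
        · exact h2
        · exact h3 x hx'
    · rw [if_neg hcb]
      obtain ⟨h1, h2, h3⟩ := ih p
      simp only [Bool.or_eq_true, Bool.and_eq_true, decide_eq_true_eq, beq_iff_eq,
        not_or, not_and] at hcb
      refine ⟨?_, h2, ?_⟩
      · rcases h1 with h | ⟨x, hx, hr⟩
        · exact Or.inl h
        · exact Or.inr ⟨x, List.mem_cons_of_mem _ hx, hr⟩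
      · intro x hx
        rcases List.mem_cons.mp hx with rfl | hx'
        · refine pvLe_trans _ p _ ?_ h2
          unfold pvLe
          rcases hcb with ⟨hc1, hc2⟩
          by_cases he : g x = p.1
          · exact Or.inr ⟨he, by have := hc2 he; omega⟩
          · exact Or.inl (by omega)
        · exact h3 x hx' 

theorem pvFoldFlat {α β : Type} (f : α → β → α) (h : Nat → List β) :
    ∀ (ks : List Nat) (p : α),
    ks.foldl (fun p k => (h k).foldl f p) p = (ks.flatMap h).foldl f p := by
  intro ks
  induction ks with
  | nil => intro p; rfl
  | cons k t ih =>
    intro p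
    simp only [List.foldl_cons, List.flatMap_cons, List.foldl_append, ih]

def pvG (words : List String) (groups : List Int) (n j : Nat) : Int :=
  1 + (pvLS words groups n j : Int)

def pvCand (words : List String) (groups : List Int) (n u : Nat) : List Nat :=
  (List.range (words.getD u "").toList.length).flatMap
    (fun k => ((pvBuckets words n).getD (pvKeyB (words.getD u "").toList k) []).filter
      (fun j => decide (u < j) && decide (groups.getD j 0 ≠ groups.getD u 0) &&
        decide ((words.getD j "").toList.getD k ' ' ≠ (words.getD u "").toList.getD k ' ')))

theorem pvCand_mem (words : List String) (groups : List Int) (n u j : Nat) :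
    j ∈ pvCand words groups n u ↔ j ∈ pvNbrs words groups n u := by
  rw [pvMem_nbrs]
  unfold pvCand
  simp only [List.mem_flatMap, List.mem_filter, List.mem_range, Bool.and_eq_true,
    decide_eq_true_eq]
  constructor
  · rintro ⟨k, hk, hb, ⟨huj, hgr⟩, hch⟩
    rw [pvBuckets_mem] at hb
    obtain ⟨hjn, hm⟩ := hb
    simp only [pvMatch, pvKeyB] at hm
    obtain ⟨hm1, hm2, hm3⟩ := hm
    have hod := (pvOneDiff (words.getD u "").toList (words.getD j "").toList).mp
      ⟨k, hk, ⟨hm1, hm2, hm3⟩, hch⟩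
    refine ⟨⟨huj, hjn⟩, ?_⟩
    unfold pvValid
    simp only [Bool.and_eq_true, decide_eq_true_eq, beq_iff_eq]
    exact ⟨⟨Ne.symm hgr, hod.1⟩, by simpa using hod.2⟩
  · rintro ⟨⟨huj, hjn⟩, hv⟩
    unfold pvValid at hv
    simp only [Bool.and_eq_true, decide_eq_true_eq, beq_iff_eq] at hv
    obtain ⟨⟨hgr, hlen⟩, hdf⟩ := hv
    obtain ⟨k, hk, ⟨hkb, ht, hd⟩, hne⟩ :=
      (pvOneDiff (words.getD u "").toList (words.getD j "").toList).mpr ⟨hlen, by simpa using hdf⟩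
    refine ⟨k, hk, ?_, ⟨huj, Ne.symm hgr⟩, hne⟩
    rw [pvBuckets_mem]
    refine ⟨hjn, ?_⟩
    simp only [pvMatch, pvKeyB]
    exact ⟨hkb, ht, hd⟩

theorem pvInner_spec (words : List String) (groups : List Int) (n : Nat)
    (bestLen nxt : List Int) (u : Nat) (_hu : u < n)
    (hBL : ∀ v, u < v → v < n → bestLen.getD v 0 = (pvLS words groups n v : Int))
    (h1 : bestLen.getD u 0 = 1) (h2 : nxt.getD u 0 = -1) :
    pvInnerB words groups (pvBuckets words n) bestLen nxt u
      = ((pvLS words groups n u : Int), pvNx words groups n u) := by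
  have hun := (pvMem_nbrs words groups n u)
  -- 1. flatten the double loop into one fold over the candidate list
  have e1 : pvInnerB words groups (pvBuckets words n) bestLen nxt u
      = (pvCand words groups n u).foldl
          (fun p j =>
            if decide (pvG words groups n j > p.1) ||
               ((pvG words groups n j == p.1) && decide ((j : Int) < p.2))
            then (pvG words groups n j, (j : Int)) else p)
          (bestLen.getD u 0, nxt.getD u 0) := by
    unfold pvInnerB pvCand
    rw [← pvFoldFlat]
    apply PySem.List.foldl_congr_mem
    intro p k hk
    rw [PySem.List.foldl_if_eq_foldl_filter]
    apply PySem.List.foldl_congr_mem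
    intro q j hj
    have hj' : j ∈ pvNbrs words groups n u := by
      rw [← pvCand_mem]
      unfold pvCand
      rw [List.mem_flatMap]
      exact ⟨k, hk, hj⟩
    obtain ⟨⟨h1', h2'⟩, _⟩ := (pvMem_nbrs words groups n u j).mp hj'
    have hb := hBL j h1' h2'
    simp only [hb, pvG]
    rfl
  rw [e1, h1, h2]
  obtain ⟨hm, hle, hall⟩ := pvFoldMax (pvG words groups n) (pvCand words groups n u) (1, -1)
  by_cases hnb : pvNbrs words groups n u = []
  · have hcnil : pvCand words groups n u = [] := by
      rw [List.eq_nil_iff_forall_not_mem]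
      intro x hx
      rw [pvCand_mem, hnb] at hx
      simp at hx
    rw [hcnil]
    simp only [List.foldl_nil]
    have hls : pvLS words groups n u = 1 := by
      unfold pvLS
      rw [pvS_char_nil words groups n u hnb]
      rfl
    unfold pvNx
    rw [if_pos hnb, hls]
    rfl
  · set J := pvFam (pvSc words groups n) (pvNbrs words groups n u) with hJdef
    obtain ⟨hJmem, hJmax⟩ := pvFam_mem (pvSc words groups n) _ hnb
    have hJnb : J ∈ pvNbrs words groups n u := hJmem
    have hls : pvLS words groups n u = pvSc words groups n J := by
      unfold pvLS
      rw [pvS_char_cons words groups n u hnb, ← hJdef]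
      simp only [List.length_cons, pvSc, pvLS]
      omega
    have hT1 : ((pvLS words groups n u : Nat) : Int) = pvG words groups n J := by
      rw [hls]; unfold pvG pvSc; push_cast; ring
    have hT2 : pvNx words groups n u = ((J : Nat) : Int) := by
      unfold pvNx
      rw [if_neg hnb]
    have hJc : J ∈ pvCand words groups n u := (pvCand_mem words groups n u J).mpr hJnb
    -- the fold result r and the target are mutually ≤
    apply pvLe_antisymm
    · -- pvLe r T
      rcases hm with hr | ⟨x, hx, hr⟩
      · rw [hr, hT1, hT2]
        left
        have := pvLS_pos words groups n J
        unfold pvG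
        simp only []
        omega
      · rw [hr, hT1, hT2]
        have hxnb := (pvCand_mem words groups n u x).mp hx
        have hxle : pvSc words groups n x ≤ pvSc words groups n J := by
          rw [hJmax]
          exact pvMx_ge _ _ x hxnb
        by_cases he : pvSc words groups n x = pvSc words groups n J
        · right
          constructor
          · unfold pvG pvSc at *
            omega
          · have hmin := pvFam_min (pvSc words groups n) _
              (pvNbrs_pairwise words groups n u) x hxnb (by rw [← hJmax, he])
            rw [← hJdef] at hmin
            show ((J : Nat) : Int) ≤ ((x : Nat) : Int)
            exact_mod_cast hmin
        · left
          unfold pvG pvSc at *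
          omega
    · -- pvLe T r
      have := hall J hJc
      rw [hT1, hT2]
      exact this

theorem pvGetD_set (l : List Int) (i v : Nat) (a : Int) (hi : i < l.length) :
    (l.set i a).getD v 0 = if v = i then a else l.getD v 0 := by
  rw [List.getD_eq_getElem?_getD, List.getD_eq_getElem?_getD, List.getElem?_set]
  by_cases h : i = v
  · subst h; simp [hi]
  · rw [if_neg h, if_neg (fun hh => h hh.symm)]

theorem pvGetD_replicate (n v : Nat) (c : Int) (h : v < n) :
    (List.replicate n c).getD v 0 = c := by
  rw [List.getD_eq_getElem?_getD, List.getElem?_replicate, if_pos h]; rfl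

def pvStage (words : List String) (groups : List Int) (n m : Nat) : List Int × List Int :=
  (List.range' (n-m) m).reverse.foldl
    (fun st u =>
      let p := pvInnerB words groups (pvBuckets words n) st.1 st.2 u
      (st.1.set u p.1, st.2.set u p.2))
    (List.replicate n 1, List.replicate n (-1))

theorem pvStage_spec (words : List String) (groups : List Int) (n : Nat) :
    ∀ m, m ≤ n →
    (pvStage words groups n m).1.length = n ∧
    (pvStage words groups n m).2.length = n ∧
    (∀ v, n - m ≤ v → v < n →
      (pvStage words groups n m).1.getD v 0 = (pvLS words groups n v : Int) ∧
      (pvStage words groups n m).2.getD v 0 = pvNx words groups n v) ∧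
    (∀ v, v < n - m →
      (pvStage words groups n m).1.getD v 0 = 1 ∧
      (pvStage words groups n m).2.getD v 0 = -1) := by
  intro m
  induction m with
  | zero =>
    intro _
    unfold pvStage
    simp only [List.range'_zero, List.reverse_nil, List.foldl_nil]
    refine ⟨List.length_replicate .., List.length_replicate .., fun v hv1 hv2 => by omega, fun v hv => ?_⟩
    exact ⟨pvGetD_replicate n v 1 (by omega), pvGetD_replicate n v (-1) (by omega)⟩
  | succ m ih =>
    intro hm
    obtain ⟨L1, L2, hs, hin⟩ := ih (by omega)
    have ht1 : n - (m+1) + 1 = n - m := by omega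
    have hstep : pvStage words groups n (m+1)
        = ((pvStage words groups n m).1.set (n - (m+1))
             (pvInnerB words groups (pvBuckets words n)
               (pvStage words groups n m).1 (pvStage words groups n m).2 (n - (m+1))).1,
           (pvStage words groups n m).2.set (n - (m+1))
             (pvInnerB words groups (pvBuckets words n)
               (pvStage words groups n m).1 (pvStage words groups n m).2 (n - (m+1))).2) := by
      unfold pvStage
      rw [List.range'_succ, List.reverse_cons, List.foldl_append, List.foldl_cons,
        List.foldl_nil, ht1]
    have hinner : pvInnerB words groups (pvBuckets words n)
        (pvStage words groups n m).1 (pvStage words groups n m).2 (n - (m+1))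
        = ((pvLS words groups n (n - (m+1)) : Int), pvNx words groups n (n - (m+1))) := by
      apply pvInner_spec words groups n _ _ _ (by omega)
      · intro v hv1 hv2
        exact (hs v (by omega) hv2).1
      · exact (hin (n - (m+1)) (by omega)).1
      · exact (hin (n - (m+1)) (by omega)).2
    rw [hstep, hinner]
    refine ⟨by simpa using L1, by simpa using L2, ?_, ?_⟩
    · intro v hv1 hv2
      constructor
      · rw [pvGetD_set _ _ _ _ (by omega)]
        by_cases h : v = n - (m+1)
        · rw [if_pos h, h]
        · rw [if_neg h]
          exact (hs v (by omega) hv2).1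
      · rw [pvGetD_set _ _ _ _ (by omega)]
        by_cases h : v = n - (m+1)
        · rw [if_pos h, h]
        · rw [if_neg h]
          exact (hs v (by omega) hv2).2
    · intro v hv
      constructor
      · rw [pvGetD_set _ _ _ _ (by omega), if_neg (by omega)]
        exact (hin v (by omega)).1
      · rw [pvGetD_set _ _ _ _ (by omega), if_neg (by omega)]
        exact (hin v (by omega)).2

theorem pvLoopB_spec (words : List String) (groups : List Int) (n : Nat) :
    (pvLoopB words groups n (pvBuckets words n)).1.length = n ∧
    (pvLoopB words groups n (pvBuckets words n)).2.length = n ∧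
    ∀ v, v < n →
      (pvLoopB words groups n (pvBuckets words n)).1.getD v 0 = (pvLS words groups n v : Int) ∧
      (pvLoopB words groups n (pvBuckets words n)).2.getD v 0 = pvNx words groups n v := by
  have he : pvLoopB words groups n (pvBuckets words n) = pvStage words groups n n := by
    unfold pvLoopB pvStage
    rw [List.range_eq_range', Nat.sub_self]
  obtain ⟨h1, h2, hs, _⟩ := pvStage_spec words groups n n (le_refl n)
  rw [he]
  exact ⟨h1, h2, fun v hv => hs v (by omega) hv⟩

theorem pvFoldFM_nat (sc : Nat → Nat) (t : List Nat) (s : Nat) :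
    t.foldl (fun s i => if sc s < sc i then i else s) s
      = if sc s < pvMx sc t then pvFam sc t else s :=
  pvFoldFM (fun j => j) sc sc t (fun _ _ => rfl) s

theorem pvStartAux (words : List String) (groups : List Int) (n : Nat) (bestLen : List Int)
    (hBL : ∀ v, v < n → bestLen.getD v 0 = (pvLS words groups n v : Int)) :
    ∀ (t : List Nat) (s : Nat), s < n → (∀ i ∈ t, i < n) →
    t.foldl (fun s i =>
        if s == (-1:Int) || decide (bestLen.getD i 0 > bestLen.getD s.toNat 0)
        then (i : Int) else s) ((s : Nat) : Int)
      = ((t.foldl (fun s i =>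
            if pvLS words groups n s < pvLS words groups n i then i else s) s : Nat) : Int) := by
  intro t
  induction t with
  | nil => intro s _ _; rfl
  | cons i t ih =>
    intro s hs hall
    simp only [List.foldl_cons]
    have hsneq : (((s : Nat) : Int) == (-1 : Int)) = false := by
      simp only [beq_eq_false_iff_ne]; omega
    rw [hsneq]
    simp only [Bool.false_or, Int.toNat_natCast]
    simp only [hBL i (hall i (List.mem_cons_self ..)), hBL s hs]
    simp only [gt_iff_lt, Nat.cast_lt, decide_eq_true_eq]
    by_cases hlt : pvLS words groups n s < pvLS words groups n i
    · rw [if_pos hlt, if_pos hlt]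
      exact ih i (hall i (List.mem_cons_self ..)) (fun x hx => hall x (List.mem_cons_of_mem _ hx))
    · rw [if_neg hlt, if_neg hlt]
      exact ih s hs (fun x hx => hall x (List.mem_cons_of_mem _ hx))

theorem pvStart_spec (words : List String) (groups : List Int) (n : Nat) (bestLen : List Int)
    (hBL : ∀ v, v < n → bestLen.getD v 0 = (pvLS words groups n v : Int)) (hn : 0 < n) :
    pvStartB bestLen n = ((pvFam (pvLS words groups n) (List.range n) : Nat) : Int) := by
  obtain ⟨m, rfl⟩ : ∃ m, n = m + 1 := ⟨n - 1, by omega⟩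
  have hstep : pvStartB bestLen (m+1)
      = (List.range' 1 m).foldl (fun s i =>
          if s == (-1:Int) || decide (bestLen.getD i 0 > bestLen.getD s.toNat 0)
          then (i : Int) else s) (((0 : Nat) : Int)) := by
    unfold pvStartB
    rw [List.range_eq_range', List.range'_succ, List.foldl_cons]
    norm_num
  rw [hstep, pvStartAux words groups (m+1) bestLen hBL (List.range' 1 m) 0 (by omega)
    (by intro i hi; have := List.mem_range'_1.mp hi; omega)]
  congr 1
  rw [pvFoldFM_nat (pvLS words groups (m+1)) (List.range' 1 m) 0]
  rw [List.range_eq_range', List.range'_succ]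
  simp only [pvFam]
  by_cases hc : pvMx (pvLS words groups (m+1)) (List.range' 1 m) ≤ pvLS words groups (m+1) 0
  · rw [if_neg (by omega), if_pos hc]
  · rw [if_pos (by omega), if_neg hc]

theorem pvFollow_neg (words : List String) (nxt : List Int) (f : Nat) :
    pvFollowB words nxt f (-1) = [] := by
  cases f <;> simp [pvFollowB]

theorem pvFollow_spec (words : List String) (groups : List Int) (n : Nat) (nxt : List Int)
    (hNX : ∀ v, v < n → nxt.getD v 0 = pvNx words groups n v) :
    ∀ (f u : Nat), u < n → n - u ≤ f →
    pvFollowB words nxt f ((u : Nat) : Int) = pvS words groups n u := by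
  intro f
  induction f with
  | zero => intro u hu hf; omega
  | succ f ih =>
    intro u hu hf
    rw [pvFollowB]
    rw [if_neg (by simp only [beq_iff_eq]; omega)]
    simp only [Int.toNat_natCast]
    rw [hNX u hu]
    by_cases hnb : pvNbrs words groups n u = []
    · unfold pvNx
      rw [if_pos hnb, pvFollow_neg, pvS_char_nil words groups n u hnb]
    · unfold pvNx
      rw [if_neg hnb]
      obtain ⟨hJm, _⟩ := pvFam_mem (pvSc words groups n) _ hnb
      obtain ⟨⟨hJ1, hJ2⟩, _⟩ := (pvMem_nbrs words groups n u _).mp hJm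
      rw [ih _ hJ2 (by omega)]
      rw [pvS_char_cons words groups n u hnb]

-- ===== VERDICT (by name: the statement is the Claim_ definition above) =====
theorem getWordsinLongestSubsequenceDAG_spec : Claim_equal_getWordsinLongestSubsequenceDAG := by
  intro words groups hdom hpre
  unfold Spec_getWordsinLongestSubsequenceDAG
  have hA : getWordsinLongestSubsequenceDAG words groups
      = (List.range words.length).foldl
          (fun ans i => if ans.length < pvLS words groups words.length i
            then pvS words groups words.length i else ans) [] := by
    unfold getWordsinLongestSubsequenceDAG
    apply PySem.List.foldl_congr_mem
    intro acc i _
    rfl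
  obtain ⟨hL1, hL2, hsp⟩ := pvLoopB_spec words groups words.length
  have hB : getWordsinLongestSubsequenceDAG_alt words groups
      = pvFollowB words (pvLoopB words groups words.length (pvBuckets words words.length)).2
          words.length
          (pvStartB (pvLoopB words groups words.length (pvBuckets words words.length)).1
            words.length) := rfl
  rw [hA, hB, pvFoldFM (pvS words groups words.length) List.length
    (pvLS words groups words.length) (List.range words.length) (fun j _ => rfl) []]
  rcases Nat.eq_zero_or_pos words.length with hz | hpos
  · rw [hz]
    rw [List.range_zero, if_neg (by simp [pvMx])]
    rfl
  · have hrne : List.range words.length ≠ [] := by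
      simp only [ne_eq, List.range_eq_nil]; omega
    obtain ⟨hfmem, _⟩ := pvFam_mem (pvLS words groups words.length) (List.range words.length) hrne
    have hfamlt : pvFam (pvLS words groups words.length) (List.range words.length)
        < words.length := List.mem_range.mp hfmem
    rw [pvStart_spec words groups words.length _ (fun v hv => (hsp v hv).1) hpos]
    rw [pvFollow_spec words groups words.length _ (fun v hv => (hsp v hv).2) words.length _
      hfamlt (by omega)]
    rw [if_pos ?hc]
    case hc =>
      have h0 : (0 : Nat) ∈ List.range words.length := List.mem_range.mpr hpos
      have h1 := pvMx_ge (pvLS words groups words.length) _ 0 h0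
      have h2 := pvLS_pos words groups words.length 0
      simp only [List.length_nil]
      omega
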